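-- pv_equiv track=rewrite | github.com/hungphongtrn/midflowlm | src/eval/text_checkpoint_sweep.py | validate_num_steps
-- ===== SOURCE A (Python) =====
-- def validate_num_steps(num_steps: list[int], max_steps_T: int) -> list[str]:
--     warnings = []
--     for step_count in num_steps:
--         if step_count <= 0:
--             raise ValueError("All num_steps values must be positive integers")
--         if step_count > max_steps_T:
--             warnings.append(
--                 f"Requested num_steps={step_count} exceeds max_steps_T={max_steps_T}. "
--                 "This is allowed, but discrete step embeddings clamp to the final trained step, "
--                 "so results are extrapolative and may degrade."
--             )
--     return warnings
-- ===== SOURCE B (Python) =====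
-- def validate_num_steps(num_steps: list[int], max_steps_T: int) -> list[str]:
--     if not num_steps:
--         return []
--     if len(num_steps) == 1:
--         step_count = num_steps[0]
--         if step_count <= 0:
--             raise ValueError("All num_steps values must be positive integers")
--         if step_count > max_steps_T:
--             return [
--                 f"Requested num_steps={step_count} exceeds max_steps_T={max_steps_T}. "
--                 "This is allowed, but discrete step embeddings clamp to the final trained step, "
--                 "so results are extrapolative and may degrade."
--             ]
--         return []
--     mid = len(num_steps) // 2
--     return validate_num_steps(num_steps[:mid], max_steps_T) + validate_num_steps(
--         num_steps[mid:], max_steps_T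
--     )
-- ===== Notes on version B (the rewrite author's own statement) =====
-- stated objective: alternative
-- what changed: Replaced A's single accumulator loop by divide-and-conquer recursion: singleton base cases validate and emit the warning, and larger lists are split at the midpoint with the two recursive warning lists concatenated (correct because the warning list is a homomorphic image of the input list, so it distributes over concatenation).
import Mathlib
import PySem

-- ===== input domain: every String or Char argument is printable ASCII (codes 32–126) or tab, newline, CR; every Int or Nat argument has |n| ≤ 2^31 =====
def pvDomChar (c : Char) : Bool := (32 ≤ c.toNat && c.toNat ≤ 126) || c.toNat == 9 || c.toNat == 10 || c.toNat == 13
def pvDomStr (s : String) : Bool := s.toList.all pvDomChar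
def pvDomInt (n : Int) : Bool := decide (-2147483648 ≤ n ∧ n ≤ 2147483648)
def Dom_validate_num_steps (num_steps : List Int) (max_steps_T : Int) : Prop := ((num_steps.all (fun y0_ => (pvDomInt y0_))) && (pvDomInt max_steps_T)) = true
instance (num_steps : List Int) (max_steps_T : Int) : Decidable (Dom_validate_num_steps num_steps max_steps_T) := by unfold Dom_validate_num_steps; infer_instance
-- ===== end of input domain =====

-- B replaces A's single accumulator loop by divide-and-conquer recursion over midpoint splits
-- (objective: alternative).

-- the warning message, built exactly as the Python f-string builds it (shared text of both programs)
def pvMsg (s T : Int) : String :=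
  "Requested num_steps=" ++ PySem.Int.toStr s ++ " exceeds max_steps_T=" ++ PySem.Int.toStr T ++
  ". This is allowed, but discrete step embeddings clamp to the final trained step, " ++
  "so results are extrapolative and may degrade."

-- ===== PORT A =====
-- A's loop: accumulate warnings; on a nonpositive element Python raises ValueError
-- (outside Pre_), the port returns the warnings accumulated so far there.
def validate_num_steps_loop (T : Int) (warnings : List String) : List Int → List String
  | [] => warnings
  | s :: rest =>
      if s ≤ 0 then warnings
      else if T < s then validate_num_steps_loop T (warnings ++ [pvMsg s T]) rest
      else validate_num_steps_loop T warnings rest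

def validate_num_steps (num_steps : List Int) (max_steps_T : Int) : List String :=
  validate_num_steps_loop max_steps_T [] num_steps

-- ===== PORT B =====
-- B's divide-and-conquer: singleton base case validates and emits, larger lists split at the
-- midpoint and concatenate the recursive warning lists. Python raises ValueError on a
-- nonpositive singleton (outside Pre_); the port returns [] there.
-- ns[:mid] / ns[mid:] are ported as List.take/drop, exact here since 0 <= mid <= len(ns).
def validate_num_steps_alt (num_steps : List Int) (max_steps_T : Int) : List String :=
  match num_steps with
  | [] => []
  | [step_count] =>
      if step_count ≤ 0 then []
      else if max_steps_T < step_count then [pvMsg step_count max_steps_T] else []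
  | a :: b :: rest =>
      let mid := (a :: b :: rest).length / 2
      validate_num_steps_alt ((a :: b :: rest).take mid) max_steps_T ++
        validate_num_steps_alt ((a :: b :: rest).drop mid) max_steps_T
termination_by num_steps.length
decreasing_by
  · simp; omega
  · simp; omega

-- ===== PRECONDITION & SPEC =====
-- Pre_ excludes exactly the inputs with a nonpositive element, on which A raises ValueError.
def Pre_validate_num_steps (num_steps : List Int) (max_steps_T : Int) : Prop :=
  ∀ s ∈ num_steps, 0 < s
instance (num_steps : List Int) (max_steps_T : Int) : Decidable (Pre_validate_num_steps num_steps max_steps_T) := by unfold Pre_validate_num_steps; infer_instance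

def pvWitness_validate_num_steps : List Int × Int := ([1, 5, 3], 4)

def Spec_validate_num_steps (num_steps : List Int) (max_steps_T : Int) (out : List String) : Prop := out = validate_num_steps_alt num_steps max_steps_T
instance (num_steps : List Int) (max_steps_T : Int) (out : List String) : Decidable (Spec_validate_num_steps num_steps max_steps_T out) := by unfold Spec_validate_num_steps; infer_instance

-- ===== CLAIM (what is proved, stated in full; the proofs are below) =====
def Claim_equal_validate_num_steps : Prop := ∀ (num_steps : List Int) (max_steps_T : Int), Dom_validate_num_steps num_steps max_steps_T → Pre_validate_num_steps num_steps max_steps_T → Spec_validate_num_steps num_steps max_steps_T (validate_num_steps num_steps max_steps_T)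

-- ===== LEMMAS AND PROOFS =====
-- the warning list as a homomorphic image of the input: A's loop flattens to it, and B's
-- divide-and-conquer equals it because it distributes over ++.
def pvWarn (T : Int) (ns : List Int) : List String :=
  (ns.filter (fun s => decide (T < s))).map (fun s => pvMsg s T)

theorem validate_num_steps_alt_eq (ns : List Int) (T : Int) :
    (∀ s ∈ ns, 0 < s) → validate_num_steps_alt ns T = pvWarn T ns := by
  induction ns using validate_num_steps_alt.induct T with
  | case1 => intro _; simp [validate_num_steps_alt, pvWarn]
  | case2 s hs =>
      intro h; exact absurd (h s (List.mem_cons_self ..)) (by omega)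
  | case3 s hs hT => intro _; simp [validate_num_steps_alt, pvWarn, hs, hT]
  | case4 s hs hT => intro _; simp [validate_num_steps_alt, pvWarn, hs, hT]
  | case5 a b rest mid ih1 ih2 =>
      intro h
      rw [validate_num_steps_alt]
      rw [ih1 (fun s hs => h s (List.mem_of_mem_take hs)),
          ih2 (fun s hs => h s (List.mem_of_mem_drop hs))]
      simp only [pvWarn, ← List.map_append, ← List.filter_append, List.take_append_drop]

theorem validate_num_steps_loop_eq (T : Int) (ns : List Int) (acc : List String)
    (h : ∀ s ∈ ns, 0 < s) :
    validate_num_steps_loop T acc ns = acc ++ pvWarn T ns := by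
  induction ns generalizing acc with
  | nil => simp [validate_num_steps_loop, pvWarn]
  | cons s rest ih =>
      have hs : 0 < s := h s (List.mem_cons_self ..)
      have hrest : ∀ x ∈ rest, 0 < x := fun x hx => h x (List.mem_cons_of_mem _ hx)
      by_cases hT : T < s <;>
        simp [validate_num_steps_loop, pvWarn, not_le.mpr hs, hT, ih _ hrest]

-- ===== VERDICT (by name: the statement is the Claim_ definition above) =====
theorem validate_num_steps_spec : Claim_equal_validate_num_steps := by
  intro ns T _ hpre
  unfold Spec_validate_num_steps validate_num_steps
  rw [validate_num_steps_alt_eq ns T hpre]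
  simpa using validate_num_steps_loop_eq T ns [] hpre
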